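-- pv_equiv track=rewrite | github.com/eetuahon/aoc21 | d15.py | make_sumtable
-- ===== SOURCE A (Python) =====
-- def update_diags(f, s):
--     c = 0
--     y_len = len(f)
--     x_len = len(f[0])
--     for y in range(y_len - 2, -1, -1):
--         for x in range(x_len - 2, -1, -1):
--             n = min(s[y+1][x], s[y][x+1])
--             if s[y][x] > f[y][x] + n:
--                 c += 1
--                 s[y][x] = f[y][x] + n
--     for y in range(1, y_len):
--         for x in range(1, x_len):
--             n = min(s[y-1][x], s[y][x-1])
--             if s[y][x] > f[y][x] + n:
--                 c += 1
--                 s[y][x] = f[y][x] + n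
--     return c
--
-- def make_sumtable(f):
--     sumtable = []
--     y_len = len(f)
--     x_len = len(f[0])
--     for y in range(y_len):
--         sumtable.append([0 for x in range(x_len)])
--     for y in range(y_len):
--         for x in range(x_len):
--             if y == 0 and x == 0:
--                 sumtable[y][x] = f[0][0]
--             elif y == 0:
--                 sumtable[y][x] = f[y][x] + sumtable[y][x-1]
--             elif x == 0:
--                 sumtable[y][x] = f[y][x] + sumtable[y-1][x]
--             else:
--                 sumtable[y][x] = f[y][x] + min(sumtable[y-1][x], sumtable[y][x-1])
--     updates = 1
--     while updates != 0:
--         updates = update_diags(f, sumtable)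
--     return sumtable
-- ===== SOURCE B (Python) =====
-- def make_sumtable(f):
--     h, w = len(f), len(f[0])
--
--     def relaxed(s, y, x):
--         v = s[y][x]
--         if 0 < y and 0 < x:
--             v = min(v, f[y][x] + min(s[y - 1][x], s[y][x - 1]))
--         if y < h - 1 and x < w - 1:
--             v = min(v, f[y][x] + min(s[y + 1][x], s[y][x + 1]))
--         return v
--
--     # seed: cumulative costs of monotone (right/down) paths, by running row scans
--     row = []
--     total = 0
--     for x in range(w):
--         total += f[0][x]
--         row.append(total)
--     s = [row]
--     for y in range(1, h):
--         prev = s[-1]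
--         row = [prev[0] + f[y][0]]
--         for x in range(1, w):
--             row.append(f[y][x] + min(prev[x], row[-1]))
--         s.append(row)
--     # settle: rebuild the whole table from the diagonal recurrences until stable
--     while True:
--         nxt = [[relaxed(s, y, x) for x in range(w)] for y in range(h)]
--         if nxt == s:
--             return s
--         s = nxt
-- ===== Notes on version B (the rewrite author's own statement) =====
-- stated objective: alternative
-- what changed: A relaxes the table in place with two counted directional Gauss-Seidel sweeps repeated until the update counter is zero; B seeds the same monotone-path table by running row scans and then settles it by pure Jacobi iteration, rebuilding the whole table functionally from the diagonal recurrences each round until it stops changing; …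
-- outside the precondition, e.g. on make_sumtable([[], [0]]): A returns [[], []], B raises IndexError; on make_sumtable([[0, 0], [0, -1]]): A returns [[0, 0], [0, -1]], B returns [[0, 0], [0, -1]]
import Mathlib
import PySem

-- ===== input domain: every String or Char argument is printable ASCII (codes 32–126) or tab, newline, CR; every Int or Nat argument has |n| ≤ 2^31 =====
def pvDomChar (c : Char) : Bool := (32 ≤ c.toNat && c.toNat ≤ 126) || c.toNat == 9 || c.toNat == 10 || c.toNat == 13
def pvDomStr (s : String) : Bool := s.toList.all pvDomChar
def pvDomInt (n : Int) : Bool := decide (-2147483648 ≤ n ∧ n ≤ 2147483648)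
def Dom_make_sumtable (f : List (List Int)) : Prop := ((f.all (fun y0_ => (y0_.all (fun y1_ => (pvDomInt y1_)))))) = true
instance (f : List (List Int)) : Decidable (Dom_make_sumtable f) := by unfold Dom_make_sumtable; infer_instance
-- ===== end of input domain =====

-- B replaces A's two counted in-place Gauss-Seidel sweeps (repeated until the update counter
-- is zero) by a seed built from running row scans followed by a pure Jacobi iteration that
-- rebuilds the whole table functionally each round until it stops changing (objective:
-- alternative algorithm, similar cost).

-- 2-d access helpers shared by the two ports: Python s[y][x] and s[y][x] = v, exact for the
-- nonnegative in-range indices that both programs use on inputs admitted by Pre_.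
def getc (s : List (List Int)) (y x : Nat) : Int := (s.getD y []).getD x 0
def get2 (s : List (List Int)) (y x : Int) : Int := getc s y.toNat x.toNat
def setc (s : List (List Int)) (y x : Nat) (v : Int) : List (List Int) := s.set y ((s.getD y []).set x v)
def set2 (s : List (List Int)) (y x : Int) (v : Int) : List (List Int) := setc s y.toNat x.toNat v

-- ===== PORT A =====
-- the body of both inner loops of update_diags (d = +1 backward sweep, d = -1 forward sweep)
def sweepStep (f : List (List Int)) (d : Int) (st : Int × List (List Int)) (y x : Int) : Int × List (List Int) :=
  if get2 f y x + min (get2 st.2 (y + d) x) (get2 st.2 y (x + d)) < get2 st.2 y x then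
    (st.1 + 1, set2 st.2 y x (get2 f y x + min (get2 st.2 (y + d) x) (get2 st.2 y (x + d))))
  else st

def update_diags (f s : List (List Int)) : Int × List (List Int) :=
  let y_len : Int := f.length
  let x_len : Int := (f.headD []).length
  let st1 := (PySem.List.pyRange (y_len - 2) (-1) (-1)).foldl
    (fun st y => (PySem.List.pyRange (x_len - 2) (-1) (-1)).foldl (fun st x => sweepStep f 1 st y x) st)
    (0, s)
  (PySem.List.pyRange 1 y_len 1).foldl
    (fun st y => (PySem.List.pyRange 1 x_len 1).foldl (fun st x => sweepStep f (-1) st y x) st) st1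

-- 'while updates != 0' with fuel; under Pre_ every round before the last strictly decreases
-- the nonnegative total sumAll, so (sumAll s1).toNat + 1 rounds are enough (proved below)
def loopA (f : List (List Int)) : Nat → List (List Int) → List (List Int)
  | 0, s => s
  | n + 1, s =>
    let p := update_diags f s
    if p.1 = 0 then p.2 else loopA f n p.2

def sumAll (s : List (List Int)) : Int := (s.map List.sum).sum

-- the body of the row-major initialisation loop (the if/elif chain of A)
def fillCell (f s : List (List Int)) (y x : Int) : List (List Int) :=
  if y = 0 ∧ x = 0 then set2 s y x (get2 f 0 0)
  else if y = 0 then set2 s y x (get2 f y x + get2 s y (x - 1))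
  else if x = 0 then set2 s y x (get2 f y x + get2 s (y - 1) x)
  else set2 s y x (get2 f y x + min (get2 s (y - 1) x) (get2 s y (x - 1)))

def make_sumtable (f : List (List Int)) : List (List Int) :=
  let y_len : Int := f.length
  let x_len : Int := (f.headD []).length
  let s0 : List (List Int) := (PySem.List.pyRange 0 y_len 1).foldl (fun s _ => s ++ [List.replicate x_len.toNat 0]) []
  let s1 := (PySem.List.pyRange 0 y_len 1).foldl (fun s y =>
    (PySem.List.pyRange 0 x_len 1).foldl (fun s x => fillCell f s y x) s) s0
  loopA f ((sumAll s1).toNat + 1) s1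

-- ===== PORT B =====
-- Source B's helper relaxed(s, y, x): the cell rebuilt from the two diagonal recurrences
def jval (f : List (List Int)) (h w : Int) (s : List (List Int)) (y x : Int) : Int :=
  let v0 := get2 s y x
  let v1 := if 0 < y ∧ 0 < x then min v0 (get2 f y x + min (get2 s (y - 1) x) (get2 s y (x - 1))) else v0
  if y < h - 1 ∧ x < w - 1 then min v1 (get2 f y x + min (get2 s (y + 1) x) (get2 s y (x + 1))) else v1

-- the comprehension 'nxt = [[relaxed(s, y, x) for x in range(w)] for y in range(h)]'
def jstep (f : List (List Int)) (h w : Int) (s : List (List Int)) : List (List Int) :=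
  (PySem.List.pyRange 0 h 1).map (fun y => (PySem.List.pyRange 0 w 1).map (fun x => jval f h w s y x))

-- 'while True: … if nxt == s: return s; s = nxt' with fuel (bound proved sufficient below)
def loopB (f : List (List Int)) (h w : Int) : Nat → List (List Int) → List (List Int)
  | 0, s => s
  | n + 1, s =>
    let t := jstep f h w s
    if t = s then s else loopB f h w n t

-- Source B's inner scan building row y of the seed from the previous row
def rowB (f : List (List Int)) (prev : List Int) (y w : Int) : List Int :=
  (PySem.List.pyRange 1 w 1).foldl
    (fun (row : List Int) x => row ++ [get2 f y x + min (prev.getD x.toNat 0) (row.getLastD 0)])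
    [prev.getD 0 0 + get2 f y 0]

def make_sumtable_alt (f : List (List Int)) : List (List Int) :=
  let h : Int := f.length
  let w : Int := (f.headD []).length
  let p := (PySem.List.pyRange 0 w 1).foldl
    (fun (p : Int × List Int) x => (p.1 + get2 f 0 x, p.2 ++ [p.1 + get2 f 0 x])) (0, [])
  let s1 := (PySem.List.pyRange 1 h 1).foldl (fun s y => s ++ [rowB f (s.getLastD []) y w]) [p.2]
  loopB f h w ((sumAll s1).toNat + 1) s1

-- ===== PRECONDITION & SPEC =====
-- Pre_ excludes: inputs A raises on (a later row shorter than the first); empty grids and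
-- empty-first-row grids, where A returns a degenerate table of empty rows but B's row scan
-- raises; and, for grids with at least 2 rows and 2 columns, grids with a negative entry
-- among the read columns: on those A's relaxation loop usually never terminates, and
-- termination is not a closed-form condition on the input (where A does stop, B agrees).
def Pre_make_sumtable (f : List (List Int)) : Prop :=
  f ≠ [] ∧ (f.headD []) ≠ [] ∧
  (∀ r ∈ f, (f.headD []).length ≤ r.length) ∧
  (f.length = 1 ∨ (f.headD []).length = 1 ∨ ∀ r ∈ f, ∀ v ∈ r.take (f.headD []).length, 0 ≤ v)
instance (f : List (List Int)) : Decidable (Pre_make_sumtable f) := by unfold Pre_make_sumtable; infer_instance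

def pvWitness_make_sumtable : List (List Int) := [[1, 2], [3, 4]]

def Spec_make_sumtable (f : List (List Int)) (out : List (List Int)) : Prop := out = make_sumtable_alt f
instance (f : List (List Int)) (out : List (List Int)) : Decidable (Spec_make_sumtable f out) := by unfold Spec_make_sumtable; infer_instance

-- ===== CLAIM (what is proved, stated in full; the proofs are below) =====
def Claim_equal_make_sumtable : Prop := ∀ (f : List (List Int)), Dom_make_sumtable f → Pre_make_sumtable f → Spec_make_sumtable f (make_sumtable f)

-- ===== LEMMAS AND PROOFS =====

-- the reference recurrence both initial tables compute
def dpR (f : List (List Int)) : Nat → Nat → Int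
  | 0, 0 => getc f 0 0
  | 0, x + 1 => getc f 0 (x + 1) + dpR f 0 x
  | y + 1, 0 => getc f (y + 1) 0 + dpR f y 0
  | y + 1, x + 1 => getc f (y + 1) (x + 1) + min (dpR f y (x + 1)) (dpR f (y + 1) x)
  termination_by y x => (y, x)

def dpTable (f : List (List Int)) (h w : Nat) : List (List Int) :=
  (List.range h).map (fun y => (List.range w).map (fun x => dpR f y x))

-- shapes, pointwise order, nonnegativity, and the common post-fixpoint property
def Shape2 (h w : Nat) (s : List (List Int)) : Prop := s.length = h ∧ ∀ r ∈ s, r.length = w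
def LeT (h w : Nat) (a b : List (List Int)) : Prop := ∀ y x : Nat, y < h → x < w → getc a y x ≤ getc b y x
def NNT (h w : Nat) (s : List (List Int)) : Prop := ∀ y x : Nat, y < h → x < w → 0 ≤ getc s y x
def NNF (f : List (List Int)) (h w : Nat) : Prop := ∀ y x : Nat, y < h → x < w → 0 ≤ getc f y x
def PFT (f : List (List Int)) (h w : Nat) (s : List (List Int)) : Prop :=
  (∀ y x : Nat, y + 2 ≤ h → x + 2 ≤ w →
     getc s y x ≤ getc f y x + min (getc s (y + 1) x) (getc s y (x + 1))) ∧
  (∀ y x : Nat, 1 ≤ y → y < h → 1 ≤ x → x < w →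
     getc s y x ≤ getc f y x + min (getc s (y - 1) x) (getc s y (x - 1)))

-- ---------- basic getc/setc/sum lemmas ----------
theorem foldl_inv {α β : Type} (g : β → α → β) (P : β → Prop) :
    ∀ (l : List α) (b : β), P b → (∀ b' a, a ∈ l → P b' → P (g b' a)) → P (l.foldl g b) := by
  intro l
  induction l with
  | nil => intro b hb _; exact hb
  | cons a t ih =>
    intro b hb hstep
    exact ih (g b a) (hstep b a (by simp) hb) (fun b' x hx => hstep b' x (by simp [hx]))

theorem getD_set {α : Type} (l : List α) (i j : Nat) (v d : α) :
    (l.set i v).getD j d = if i = j ∧ i < l.length then v else l.getD j d := by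
  induction l generalizing i j with
  | nil => simp
  | cons a t ih =>
    cases i with
    | zero => cases j <;> simp
    | succ i' =>
      cases j with
      | zero => simp
      | succ j' =>
        simp only [List.set_cons_succ, List.getD_cons_succ, List.length_cons, ih i' j']
        by_cases h : i' = j' ∧ i' < t.length
        · rw [if_pos h, if_pos (by omega)]
        · rw [if_neg h, if_neg (by omega)]

theorem getc_eq_getElem {s : List (List Int)} {y x : Nat} (hy : y < s.length) (hx : x < (s[y]'hy).length) :
    getc s y x = (s[y]'hy)[x]'hx := by
  unfold getc
  have h1 : s.getD y [] = s[y]'hy := by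
    rw [List.getD_eq_getElem?_getD, List.getElem?_eq_getElem hy]; rfl
  rw [h1, List.getD_eq_getElem?_getD, List.getElem?_eq_getElem hx]; rfl

theorem row_len {h w : Nat} {s : List (List Int)} (hs : Shape2 h w s) {y : Nat} (hy : y < h) :
    (s.getD y []).length = w := by
  obtain ⟨h1, h2⟩ := hs
  rw [List.getD_eq_getElem?_getD, List.getElem?_eq_getElem (by omega)]
  exact h2 _ (List.getElem_mem _)

theorem getc_setc (s : List (List Int)) (y x y' x' : Nat) (v : Int) :
    getc (setc s y x v) y' x' =
      if y = y' ∧ x = x' ∧ y < s.length ∧ x < (s.getD y []).length then v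
      else getc s y' x' := by
  unfold getc setc
  rw [getD_set]
  by_cases hy : y = y' ∧ y < s.length
  · rw [if_pos hy, getD_set]
    by_cases hx : x = x' ∧ x < (s.getD y []).length
    · rw [if_pos hx, if_pos ⟨hy.1, hx.1, hy.2, hx.2⟩]
    · rw [if_neg hx, if_neg (fun hc => hx ⟨hc.2.1, hc.2.2.2⟩), hy.1]
  · rw [if_neg hy, if_neg (fun hc => hy ⟨hc.1, hc.2.2.1⟩)]

theorem shape_setc {h w : Nat} {s : List (List Int)} (hs : Shape2 h w s) (y x : Nat) (v : Int) :
    Shape2 h w (setc s y x v) := by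
  by_cases hy : y < s.length
  · refine ⟨by simp [setc, hs.1], ?_⟩
    intro r hr
    rcases List.mem_or_eq_of_mem_set hr with h | h
    · exact hs.2 r h
    · subst h
      rw [List.length_set]
      exact row_len hs (hs.1 ▸ hy)
  · have he : setc s y x v = s := by
      unfold setc; exact List.set_eq_of_length_le (by omega)
    rw [he]; exact hs

theorem sum_set_getD (l : List Int) (i : Nat) (v : Int) (h : i < l.length) :
    (l.set i v).sum = l.sum - l.getD i 0 + v := by
  induction l generalizing i with
  | nil => simp at h
  | cons a t ih =>
    cases i with
    | zero => simp [List.sum_cons]; ring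
    | succ j =>
      simp only [List.set_cons_succ, List.sum_cons, List.getD_cons_succ]
      rw [ih j (by simpa using h)]; ring

theorem sumAll_setc {s : List (List Int)} {y x : Nat} (hy : y < s.length)
    (hx : x < (s.getD y []).length) (v : Int) :
    sumAll (setc s y x v) = sumAll s - getc s y x + v := by
  unfold sumAll setc getc
  induction s generalizing y with
  | nil => simp at hy
  | cons r t ih =>
    cases y with
    | zero =>
      simp only [List.getD_cons_zero] at hx ⊢
      simp [sum_set_getD r x v hx]; ring
    | succ j =>
      simp only [List.getD_cons_succ] at hx ⊢
      simp only [List.set_cons_succ, List.map_cons, List.sum_cons]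
      rw [ih (by simpa using hy) hx]; ring

theorem sumAll_nonneg {h w : Nat} {s : List (List Int)} (hs : Shape2 h w s) (hn : NNT h w s) :
    0 ≤ sumAll s := by
  unfold sumAll
  apply List.sum_nonneg
  intro a ha
  rw [List.mem_map] at ha
  obtain ⟨r, hr, rfl⟩ := ha
  apply List.sum_nonneg
  intro v hv
  obtain ⟨y, hy, hyr⟩ := List.getElem_of_mem hr
  obtain ⟨x, hx, hxv⟩ := List.getElem_of_mem hv
  have hvx : v = getc s y x := by
    rw [getc_eq_getElem hy (by rw [hyr]; exact hx)]
    simp only [hyr, hxv]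
  rw [hvx]
  exact hn y x (hs.1 ▸ hy) (hs.2 r hr ▸ hx)

theorem table_ext {h w : Nat} {s t : List (List Int)} (hs : Shape2 h w s) (ht : Shape2 h w t)
    (he : ∀ y x : Nat, y < h → x < w → getc s y x = getc t y x) : s = t := by
  apply List.ext_getElem (hs.1.trans ht.1.symm)
  intro y hy1 hy2
  apply List.ext_getElem (by rw [hs.2 _ (List.getElem_mem hy1), ht.2 _ (List.getElem_mem hy2)])
  intro x hx1 hx2
  have := he y x (by rw [← hs.1]; exact hy1) (by rw [← hs.2 _ (List.getElem_mem hy1)]; exact hx1)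
  rwa [getc_eq_getElem hy1 hx1, getc_eq_getElem hy2 hx2] at this

-- ---------- small access lemmas ----------
theorem mapRange_getD {α : Type} (g : Nat → α) {n i : Nat} (h : i < n) (d : α) :
    ((List.range n).map g).getD i d = g i := by
  rw [List.getD_eq_getElem?_getD, List.getElem?_map, List.getElem?_range h]; rfl

theorem getc_mapmap (g : Nat → Nat → Int) {hN wN y x : Nat} (hy : y < hN) (hx : x < wN) :
    getc ((List.range hN).map (fun y => (List.range wN).map (fun x => g y x))) y x = g y x := by
  unfold getc
  rw [mapRange_getD _ hy, mapRange_getD _ hx]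

theorem getD_oob {α : Type} {l : List α} {i : Nat} (h : l.length ≤ i) (d : α) : l.getD i d = d := by
  rw [List.getD_eq_getElem?_getD, List.getElem?_eq_none (by omega)]; rfl

theorem getD_replicate' {α : Type} (a d : α) : ∀ (n i : Nat), (List.replicate n a).getD i d = if i < n then a else d := by
  intro n
  induction n with
  | zero => intro i; simp
  | succ m ih =>
    intro i
    cases i with
    | zero => simp [List.replicate_succ]
    | succ j =>
      simp only [List.replicate_succ, List.getD_cons_succ, ih j]
      by_cases h : j < m
      · rw [if_pos h, if_pos (by omega)]
      · rw [if_neg h, if_neg (by omega)]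

theorem getc_replicate (hN wN y x : Nat) : getc (List.replicate hN (List.replicate wN (0 : Int))) y x = 0 := by
  unfold getc
  rw [getD_replicate']
  by_cases hy : y < hN
  · rw [if_pos hy, getD_replicate']
    split_ifs <;> rfl
  · rw [if_neg hy]
    simp

theorem shape_replicate (hN wN : Nat) : Shape2 hN wN (List.replicate hN (List.replicate wN (0 : Int))) := by
  constructor
  · simp
  · intro r hr
    rw [List.eq_of_mem_replicate hr]
    simp

theorem getc_dpTable {f : List (List Int)} {hN wN y x : Nat} (hy : y < hN) (hx : x < wN) :
    getc (dpTable f hN wN) y x = dpR f y x := getc_mapmap _ hy hx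

theorem shape_dpTable (f : List (List Int)) (hN wN : Nat) : Shape2 hN wN (dpTable f hN wN) := by
  refine ⟨by simp [dpTable], ?_⟩
  intro r hr
  unfold dpTable at hr
  obtain ⟨y, _, rfl⟩ := List.mem_map.mp hr
  simp

theorem dpR_nonneg {f : List (List Int)} {hN wN : Nat} (hf : NNF f hN wN) :
    ∀ y, y < hN → ∀ x, x < wN → 0 ≤ dpR f y x := by
  intro y
  induction y with
  | zero =>
    intro hy x
    induction x with
    | zero => intro hx; rw [dpR]; exact hf 0 0 hy hx
    | succ x ihx => intro hx; rw [dpR]; exact add_nonneg (hf 0 (x + 1) hy hx) (ihx (by omega))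
  | succ y ihy =>
    intro hy x
    induction x with
    | zero => intro hx; rw [dpR]; exact add_nonneg (hf (y + 1) 0 hy hx) (ihy (by omega) 0 hx)
    | succ x ihx =>
      intro hx
      rw [dpR]
      refine add_nonneg (hf (y + 1) (x + 1) hy hx) (le_min ?_ ?_)
      · exact ihy (by omega) (x + 1) hx
      · exact ihx (by omega)

-- ---------- the flattened sweep of A ----------
def stepE (f : List (List Int)) (st : Int × List (List Int)) (e : Int × Int × Int) : Int × List (List Int) :=
  sweepStep f e.1 st e.2.1 e.2.2

def sweepL (h w : Int) : List (Int × Int × Int) :=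
  ((PySem.List.pyRange (h - 2) (-1) (-1)).flatMap
      (fun y => (PySem.List.pyRange (w - 2) (-1) (-1)).map (fun x => ((1 : Int), y, x))))
    ++ ((PySem.List.pyRange 1 h 1).flatMap
      (fun y => (PySem.List.pyRange 1 w 1).map (fun x => ((-1 : Int), y, x))))

theorem flat_eq (f : List (List Int)) (d : Int) (ys xs : List Int) :
    ∀ init : Int × List (List Int),
      ys.foldl (fun st y => xs.foldl (fun st x => sweepStep f d st y x) st) init
        = (ys.flatMap (fun y => xs.map (fun x => (d, y, x)))).foldl (stepE f) init := by
  induction ys with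
  | nil => intro init; rfl
  | cons a t ih =>
    intro init
    simp only [List.flatMap_cons, List.foldl_append, List.foldl_cons, List.foldl_map]
    exact ih _

theorem ud_flat (f s : List (List Int)) :
    update_diags f s = (sweepL (f.length : Int) ((f.headD []).length : Int)).foldl (stepE f) (0, s) := by
  unfold update_diags sweepL
  rw [List.foldl_append, ← flat_eq, ← flat_eq]

def OkE (hN wN : Nat) (e : Int × Int × Int) : Prop :=
  (e.1 = 1 ∧ 0 ≤ e.2.1 ∧ e.2.1.toNat + 2 ≤ hN ∧ 0 ≤ e.2.2 ∧ e.2.2.toNat + 2 ≤ wN) ∨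
  (e.1 = -1 ∧ 1 ≤ e.2.1 ∧ e.2.1.toNat < hN ∧ 1 ≤ e.2.2 ∧ e.2.2.toNat < wN)

theorem mem_sweepL {hN wN : Nat} {e : Int × Int × Int}
    (he : e ∈ sweepL (hN : Int) (wN : Int)) : OkE hN wN e := by
  unfold sweepL at he
  rcases List.mem_append.mp he with h1 | h1
  · obtain ⟨y, hy, h2⟩ := List.mem_flatMap.mp h1
    obtain ⟨x, hx, rfl⟩ := List.mem_map.mp h2
    rw [PySem.List.mem_pyRange_neg_one] at hy hx
    refine Or.inl ⟨rfl, ?_, ?_, ?_, ?_⟩ <;> dsimp only <;> omega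
  · obtain ⟨y, hy, h2⟩ := List.mem_flatMap.mp h1
    obtain ⟨x, hx, rfl⟩ := List.mem_map.mp h2
    rw [PySem.List.mem_pyRange_one] at hy hx
    refine Or.inr ⟨rfl, ?_, ?_, ?_, ?_⟩ <;> dsimp only <;> omega

-- the invariant carried through one whole sweep of update_diags, relative to a
-- post-fixpoint lower bound b and the sweep's input table s0
def InvA (hN wN : Nat) (b s0 : List (List Int)) (st : Int × List (List Int)) : Prop :=
  Shape2 hN wN st.2 ∧ NNT hN wN st.2 ∧ LeT hN wN b st.2 ∧ LeT hN wN st.2 s0 ∧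
  0 ≤ st.1 ∧ sumAll st.2 + st.1 ≤ sumAll s0 ∧ (st.1 = 0 → st.2 = s0)

theorem relax_inv {f : List (List Int)} {hN wN : Nat} (hf : NNF f hN wN)
    {b s0 : List (List Int)} {c : Int} {s : List (List Int)}
    (Y X nY nX : Nat) (hY : Y < hN) (hX : X < wN) (hnY : nY < hN) (hnX : nX < wN)
    (hbb : getc b Y X ≤ getc f Y X + min (getc b nY X) (getc b Y nX))
    (hinv : InvA hN wN b s0 (c, s)) :
    InvA hN wN b s0
      (if getc f Y X + min (getc s nY X) (getc s Y nX) < getc s Y X then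
        (c + 1, setc s Y X (getc f Y X + min (getc s nY X) (getc s Y nX)))
      else (c, s)) := by
  obtain ⟨hsh, hnn, hble, hles0, hc0, hsum, hz⟩ := hinv
  dsimp only at hsh hnn hble hles0 hc0 hsum hz
  by_cases hfire : getc f Y X + min (getc s nY X) (getc s Y nX) < getc s Y X
  · rw [if_pos hfire]
    have hYlen : Y < s.length := by rw [hsh.1]; exact hY
    have hXlen : X < (s.getD Y []).length := by rw [row_len hsh hY]; exact hX
    set v := getc f Y X + min (getc s nY X) (getc s Y nX) with hv
    have hget : ∀ y' x' : Nat, getc (setc s Y X v) y' x' = if Y = y' ∧ X = x' then v else getc s y' x' := by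
      intro y' x'
      rw [getc_setc]
      by_cases hc : Y = y' ∧ X = x'
      · rw [if_pos ⟨hc.1, hc.2, hYlen, hXlen⟩, if_pos hc]
      · rw [if_neg (by tauto), if_neg hc]
    refine ⟨shape_setc hsh Y X v, ?_, ?_, ?_, by omega, ?_, by omega⟩
    · intro y' x' hy' hx'
      rw [hget]
      split_ifs with hc
      · exact add_nonneg (hf Y X hY hX) (le_min (hnn nY X hnY hX) (hnn Y nX hY hnX))
      · exact hnn y' x' hy' hx'
    · intro y' x' hy' hx'
      rw [hget]
      split_ifs with hc
      · obtain ⟨rfl, rfl⟩ := hc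
        have hm := min_le_min (hble nY X hnY hX) (hble Y nX hY hnX)
        omega
      · exact hble y' x' hy' hx'
    · intro y' x' hy' hx'
      rw [hget]
      split_ifs with hc
      · obtain ⟨rfl, rfl⟩ := hc
        exact le_trans (le_of_lt hfire) (hles0 Y X hY hX)
      · exact hles0 y' x' hy' hx'
    · rw [sumAll_setc hYlen hXlen]
      omega
  · rw [if_neg hfire]
    exact ⟨hsh, hnn, hble, hles0, hc0, hsum, hz⟩

theorem stepE_inv {f : List (List Int)} {hN wN : Nat} (hf : NNF f hN wN)
    {b : List (List Int)} (hb : PFT f hN wN b) {s0 : List (List Int)}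
    {st : Int × List (List Int)} {e : Int × Int × Int} (hok : OkE hN wN e)
    (hinv : InvA hN wN b s0 st) : InvA hN wN b s0 (stepE f st e) := by
  obtain ⟨d, y, x⟩ := e
  obtain ⟨c, s⟩ := st
  rcases hok with ⟨hd, hy0, hy2, hx0, hx2⟩ | ⟨hd, hy1, hyh, hx1, hxw⟩ <;> subst hd
  · dsimp only at hy0 hy2 hx0 hx2
    have e1 : (y + 1).toNat = y.toNat + 1 := by omega
    have e2 : (x + 1).toNat = x.toNat + 1 := by omega
    simp only [stepE, sweepStep, get2, set2, e1, e2]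
    exact relax_inv hf y.toNat x.toNat (y.toNat + 1) (x.toNat + 1)
      (by omega) (by omega) (by omega) (by omega)
      (hb.1 y.toNat x.toNat hy2 hx2) hinv
  · dsimp only at hy1 hyh hx1 hxw
    have e1 : (y + -1).toNat = y.toNat - 1 := by omega
    have e2 : (x + -1).toNat = x.toNat - 1 := by omega
    simp only [stepE, sweepStep, get2, set2, e1, e2]
    exact relax_inv hf y.toNat x.toNat (y.toNat - 1) (x.toNat - 1)
      hyh hxw (by omega) (by omega)
      (hb.2 y.toNat x.toNat (by omega) hyh (by omega) hxw) hinv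

theorem ud_inv {f : List (List Int)} (hf : NNF f f.length (f.headD []).length)
    {b : List (List Int)} (hb : PFT f f.length (f.headD []).length b)
    {s : List (List Int)} (hsh : Shape2 f.length (f.headD []).length s)
    (hnn : NNT f.length (f.headD []).length s) (hble : LeT f.length (f.headD []).length b s) :
    InvA f.length (f.headD []).length b s (update_diags f s) := by
  rw [ud_flat]
  apply foldl_inv (stepE f) (InvA f.length (f.headD []).length b s)
  · refine ⟨hsh, hnn, hble, fun y x hy hx => le_refl _, le_refl 0, ?_, fun _ => rfl⟩
    dsimp only
    omega
  · intro st e he hst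
    exact stepE_inv hf hb (mem_sweepL he) hst

theorem fst_mono (f : List (List Int)) :
    ∀ (l : List (Int × Int × Int)) (st : Int × List (List Int)), st.1 ≤ (l.foldl (stepE f) st).1 := by
  intro l
  induction l with
  | nil => intro st; exact le_refl _
  | cons e t ih =>
    intro st
    refine le_trans ?_ (ih (stepE f st e))
    simp only [stepE, sweepStep]
    split_ifs <;> simp

theorem sweep_zero (f : List (List Int)) :
    ∀ (l : List (Int × Int × Int)) (c : Int) (s : List (List Int)),
      (l.foldl (stepE f) (c, s)).1 = c →
      (l.foldl (stepE f) (c, s)).2 = s ∧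
      ∀ e ∈ l, ¬ (get2 f e.2.1 e.2.2 +
          min (get2 s (e.2.1 + e.1) e.2.2) (get2 s e.2.1 (e.2.2 + e.1)) < get2 s e.2.1 e.2.2) := by
  intro l
  induction l with
  | nil => intro c s _; exact ⟨rfl, by simp⟩
  | cons e t ih =>
    intro c s hz
    by_cases hfire : get2 f e.2.1 e.2.2 +
        min (get2 s (e.2.1 + e.1) e.2.2) (get2 s e.2.1 (e.2.2 + e.1)) < get2 s e.2.1 e.2.2
    · exfalso
      have h2 : (stepE f (c, s) e).1 = c + 1 := by
        simp only [stepE, sweepStep, if_pos hfire]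
      have h3 := fst_mono f t (stepE f (c, s) e)
      rw [List.foldl_cons] at hz
      omega
    · have h1 : stepE f (c, s) e = (c, s) := by
        simp only [stepE, sweepStep, if_neg hfire]
      rw [List.foldl_cons, h1] at hz
      obtain ⟨ha, hb'⟩ := ih c s hz
      refine ⟨by rw [List.foldl_cons, h1]; exact ha, ?_⟩
      intro e' he'
      rcases List.mem_cons.mp he' with rfl | hm
      · exact hfire
      · exact hb' e' hm

theorem ud_zero {f s : List (List Int)} (h0 : (update_diags f s).1 = 0) :
    (update_diags f s).2 = s ∧ PFT f f.length (f.headD []).length s := by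
  rw [ud_flat] at h0 ⊢
  obtain ⟨ha, hchk⟩ := sweep_zero f _ 0 s h0
  refine ⟨ha, ?_, ?_⟩
  · intro y x hy2 hx2
    have hmem : ((1 : Int), (y : Int), (x : Int)) ∈ sweepL (f.length : Int) ((f.headD []).length : Int) := by
      unfold sweepL
      refine List.mem_append.mpr (Or.inl (List.mem_flatMap.mpr ⟨(y : Int), ?_, List.mem_map.mpr ⟨(x : Int), ?_, rfl⟩⟩))
      · rw [PySem.List.mem_pyRange_neg_one]; omega
      · rw [PySem.List.mem_pyRange_neg_one]; omega
    have := hchk _ hmem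
    simp only [get2] at this
    have e1 : ((y : Int) + 1).toNat = y + 1 := by omega
    have e2 : ((x : Int) + 1).toNat = x + 1 := by omega
    rw [e1, e2, Int.toNat_natCast, Int.toNat_natCast] at this
    omega
  · intro y x hy1 hy hx1 hx
    have hmem : ((-1 : Int), (y : Int), (x : Int)) ∈ sweepL (f.length : Int) ((f.headD []).length : Int) := by
      unfold sweepL
      refine List.mem_append.mpr (Or.inr (List.mem_flatMap.mpr ⟨(y : Int), ?_, List.mem_map.mpr ⟨(x : Int), ?_, rfl⟩⟩))
      · rw [PySem.List.mem_pyRange_one]; omega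
      · rw [PySem.List.mem_pyRange_one]; omega
    have := hchk _ hmem
    simp only [get2] at this
    have e1 : ((y : Int) + -1).toNat = y - 1 := by omega
    have e2 : ((x : Int) + -1).toNat = x - 1 := by omega
    rw [e1, e2, Int.toNat_natCast, Int.toNat_natCast] at this
    omega

theorem loopA_spec {f : List (List Int)} (hf : NNF f f.length (f.headD []).length)
    {b : List (List Int)} (hb : PFT f f.length (f.headD []).length b) :
    ∀ (n : Nat) (s : List (List Int)), Shape2 f.length (f.headD []).length s →
      NNT f.length (f.headD []).length s → LeT f.length (f.headD []).length b s →
      (sumAll s).toNat < n →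
      PFT f f.length (f.headD []).length (loopA f n s) ∧
      Shape2 f.length (f.headD []).length (loopA f n s) ∧
      LeT f.length (f.headD []).length b (loopA f n s) ∧
      LeT f.length (f.headD []).length (loopA f n s) s := by
  intro n
  induction n with
  | zero => intro s _ _ _ hlt; omega
  | succ n ih =>
    intro s hsh hnn hble hlt
    have hiv := ud_inv hf hb hsh hnn hble
    obtain ⟨hsh', hnn', hble', hles', hc0', hsum', hz'⟩ := hiv
    by_cases h0 : (update_diags f s).1 = 0
    · have hres : loopA f (n + 1) s = (update_diags f s).2 := by
        simp only [loopA, if_pos h0]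
      obtain ⟨heq, hpf⟩ := ud_zero h0
      rw [hres, heq]
      exact ⟨hpf, hsh, hble, fun y x hy hx => le_refl _⟩
    · have hres : loopA f (n + 1) s = loopA f n (update_diags f s).2 := by
        simp only [loopA, if_neg h0]
      have hnn0 : 0 ≤ sumAll (update_diags f s).2 := sumAll_nonneg hsh' hnn'
      have hlt' : (sumAll (update_diags f s).2).toNat < n := by omega
      obtain ⟨hpf, hsh'', hble'', hle''⟩ := ih (update_diags f s).2 hsh' hnn' hble' hlt'
      rw [hres]
      exact ⟨hpf, hsh'', hble'', fun y x hy hx =>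
        le_trans (hle'' y x hy hx) (hles' y x hy hx)⟩

-- ---------- the Jacobi step of B ----------
theorem jstep_eq (f s : List (List Int)) (hN wN : Nat) :
    jstep f (hN : Int) (wN : Int) s
      = (List.range hN).map (fun (y : Nat) => (List.range wN).map (fun (x : Nat) => jval f (hN : Int) (wN : Int) s (y : Int) (x : Int))) := by
  unfold jstep
  rw [PySem.List.pyRange_zero_natCast, PySem.List.pyRange_zero_natCast, List.map_map]
  refine List.map_congr_left ?_
  intro a _
  dsimp only [Function.comp]
  rw [List.map_map]
  rfl

theorem shape_jstep (f s : List (List Int)) (hN wN : Nat) :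
    Shape2 hN wN (jstep f (hN : Int) (wN : Int) s) := by
  rw [jstep_eq]
  refine ⟨by simp, ?_⟩
  intro r hr
  obtain ⟨y, _, rfl⟩ := List.mem_map.mp hr
  simp

theorem getc_jstep (f s : List (List Int)) {hN wN y x : Nat} (hy : y < hN) (hx : x < wN) :
    getc (jstep f (hN : Int) (wN : Int) s) y x = jval f (hN : Int) (wN : Int) s (y : Int) (x : Int) := by
  rw [jstep_eq]
  exact getc_mapmap _ hy hx

theorem jval_le_self (f s : List (List Int)) (hN wN : Nat) (y x : Nat) :
    jval f (hN : Int) (wN : Int) s (y : Int) (x : Int) ≤ getc s y x := by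
  unfold jval
  have hv0 : get2 s (y : Int) (x : Int) = getc s y x := by simp [get2]
  split_ifs <;> simp only [] <;>
    first
      | (exact le_trans (min_le_left _ _) (le_trans (min_le_left _ _) (le_of_eq hv0)))
      | (exact le_trans (min_le_left _ _) (le_of_eq hv0))
      | exact le_of_eq hv0

theorem jval_nonneg {f : List (List Int)} {hN wN : Nat} (hf : NNF f hN wN)
    {s : List (List Int)} (hnn : NNT hN wN s) {y x : Nat} (hy : y < hN) (hx : x < wN) :
    0 ≤ jval f (hN : Int) (wN : Int) s (y : Int) (x : Int) := by
  unfold jval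
  have hv0 : 0 ≤ get2 s (y : Int) (x : Int) := by simpa [get2] using hnn y x hy hx
  split_ifs with h1 h2 h2
  · have e1 : ((y : Int) - 1).toNat = y - 1 := by omega
    have e2 : ((x : Int) - 1).toNat = x - 1 := by omega
    have e3 : ((y : Int) + 1).toNat = y + 1 := by omega
    have e4 : ((x : Int) + 1).toNat = x + 1 := by omega
    refine le_min (le_min hv0 ?_) ?_
    · simp only [get2, e1, e2, Int.toNat_natCast]
      exact add_nonneg (hf y x hy hx) (le_min (hnn (y - 1) x (by omega) hx) (hnn y (x - 1) hy (by omega)))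
    · simp only [get2, e3, e4, Int.toNat_natCast]
      refine add_nonneg (hf y x hy hx) (le_min (hnn (y + 1) x (by omega) hx) (hnn y (x + 1) hy (by omega)))
  · have e1 : ((y : Int) - 1).toNat = y - 1 := by omega
    have e2 : ((x : Int) - 1).toNat = x - 1 := by omega
    refine le_min hv0 ?_
    simp only [get2, e1, e2, Int.toNat_natCast]
    exact add_nonneg (hf y x hy hx) (le_min (hnn (y - 1) x (by omega) hx) (hnn y (x - 1) hy (by omega)))
  · have e3 : ((y : Int) + 1).toNat = y + 1 := by omega
    have e4 : ((x : Int) + 1).toNat = x + 1 := by omega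
    refine le_min hv0 ?_
    simp only [get2, e3, e4, Int.toNat_natCast]
    refine add_nonneg (hf y x hy hx) (le_min (hnn (y + 1) x (by omega) hx) (hnn y (x + 1) hy (by omega)))
  · exact hv0

theorem jval_ge_b {f b s : List (List Int)} {hN wN : Nat}
    (hb : PFT f hN wN b) (hble : LeT hN wN b s) {y x : Nat} (hy : y < hN) (hx : x < wN) :
    getc b y x ≤ jval f (hN : Int) (wN : Int) s (y : Int) (x : Int) := by
  unfold jval
  have hv0 : getc b y x ≤ get2 s (y : Int) (x : Int) := by simpa [get2] using hble y x hy hx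
  have hcm : ∀ u1 u2 v1 v2 : Int, getc b y x ≤ getc f y x + min u1 v1 → u1 ≤ u2 → v1 ≤ v2 →
      getc b y x ≤ getc f y x + min u2 v2 := by
    intro u1 u2 v1 v2 hh h1 h2
    have := min_le_min h1 h2
    omega
  split_ifs with h1 h2 h2
  · have e1 : ((y : Int) - 1).toNat = y - 1 := by omega
    have e2 : ((x : Int) - 1).toNat = x - 1 := by omega
    have e3 : ((y : Int) + 1).toNat = y + 1 := by omega
    have e4 : ((x : Int) + 1).toNat = x + 1 := by omega
    refine le_min (le_min hv0 ?_) ?_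
    · simp only [get2, e1, e2, Int.toNat_natCast]
      exact hcm _ _ _ _ (hb.2 y x (by omega) hy (by omega) hx)
        (hble (y - 1) x (by omega) hx) (hble y (x - 1) hy (by omega))
    · simp only [get2, e3, e4, Int.toNat_natCast]
      exact hcm _ _ _ _ (hb.1 y x (by omega) (by omega))
        (hble (y + 1) x (by omega) hx) (hble y (x + 1) hy (by omega))
  · have e1 : ((y : Int) - 1).toNat = y - 1 := by omega
    have e2 : ((x : Int) - 1).toNat = x - 1 := by omega
    refine le_min hv0 ?_
    simp only [get2, e1, e2, Int.toNat_natCast]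
    exact hcm _ _ _ _ (hb.2 y x (by omega) hy (by omega) hx)
      (hble (y - 1) x (by omega) hx) (hble y (x - 1) hy (by omega))
  · have e3 : ((y : Int) + 1).toNat = y + 1 := by omega
    have e4 : ((x : Int) + 1).toNat = x + 1 := by omega
    refine le_min hv0 ?_
    simp only [get2, e3, e4, Int.toNat_natCast]
    exact hcm _ _ _ _ (hb.1 y x (by omega) (by omega))
      (hble (y + 1) x (by omega) hx) (hble y (x + 1) hy (by omega))
  · exact hv0

theorem jval_le_v1 (f s : List (List Int)) (hN wN : Nat) (y x : Int) :
    jval f (hN : Int) (wN : Int) s y x ≤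
      (if 0 < y ∧ 0 < x then
        min (get2 s y x) (get2 f y x + min (get2 s (y - 1) x) (get2 s y (x - 1)))
      else get2 s y x) := by
  unfold jval
  split_ifs <;> first | exact min_le_left _ _ | exact le_refl _

theorem jstep_fix_PF {f s : List (List Int)} {hN wN : Nat}
    (hfix : jstep f (hN : Int) (wN : Int) s = s) (_hsh : Shape2 hN wN s) :
    PFT f hN wN s := by
  have hpt : ∀ y x : Nat, y < hN → x < wN →
      getc s y x = jval f (hN : Int) (wN : Int) s (y : Int) (x : Int) := by
    intro y x hy hx
    conv_lhs => rw [← hfix]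
    exact getc_jstep f s hy hx
  constructor
  · intro y x hy2 hx2
    have h := hpt y x (by omega) (by omega)
    have hcond : ((y : Int) < (hN : Int) - 1 ∧ (x : Int) < (wN : Int) - 1) := by omega
    have hle : jval f (hN : Int) (wN : Int) s (y : Int) (x : Int) ≤
        get2 f (y : Int) (x : Int) + min (get2 s ((y : Int) + 1) (x : Int)) (get2 s (y : Int) ((x : Int) + 1)) := by
      unfold jval
      rw [if_pos hcond]
      exact min_le_right _ _
    have e3 : ((y : Int) + 1).toNat = y + 1 := by omega
    have e4 : ((x : Int) + 1).toNat = x + 1 := by omega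
    simp only [get2, e3, e4, Int.toNat_natCast] at hle
    omega
  · intro y x hy1 hy hx1 hx
    have h := hpt y x hy hx
    have hcond : ((0 : Int) < (y : Int) ∧ (0 : Int) < (x : Int)) := by omega
    have hle : jval f (hN : Int) (wN : Int) s (y : Int) (x : Int) ≤
        get2 f (y : Int) (x : Int) + min (get2 s ((y : Int) - 1) (x : Int)) (get2 s (y : Int) ((x : Int) - 1)) := by
      refine le_trans (jval_le_v1 f s hN wN (y : Int) (x : Int)) ?_
      rw [if_pos hcond]
      exact min_le_right _ _
    have e1 : ((y : Int) - 1).toNat = y - 1 := by omega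
    have e2 : ((x : Int) - 1).toNat = x - 1 := by omega
    simp only [get2, e1, e2, Int.toNat_natCast] at hle
    omega

-- ---------- strict sum decrease ----------
theorem sum_le_getD : ∀ (a b : List Int), a.length = b.length →
    (∀ i, a.getD i 0 ≤ b.getD i 0) → a.sum ≤ b.sum := by
  intro a
  induction a with
  | nil => intro b hl _; rw [(List.length_eq_zero_iff).mp hl.symm]
  | cons x xs ih =>
    intro b hl h
    cases b with
    | nil => simp at hl
    | cons y ys =>
      simp only [List.sum_cons]
      have h0 := h 0
      simp only [List.getD_cons_zero] at h0
      refine add_le_add h0 (ih ys (by simpa using hl) ?_)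
      intro i
      have := h (i + 1)
      simpa using this

theorem sum_lt_getD : ∀ (a b : List Int), a.length = b.length →
    (∀ i, a.getD i 0 ≤ b.getD i 0) → a ≠ b → a.sum < b.sum := by
  intro a
  induction a with
  | nil => intro b hl _ hne; exact absurd ((List.length_eq_zero_iff).mp hl.symm).symm hne
  | cons x xs ih =>
    intro b hl h hne
    cases b with
    | nil => simp at hl
    | cons y ys =>
      have h0 := h 0
      simp only [List.getD_cons_zero] at h0
      have htl : ∀ i, xs.getD i 0 ≤ ys.getD i 0 := by
        intro i; have := h (i + 1); simpa using this
      by_cases hxy : x = y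
      · subst hxy
        have : xs ≠ ys := by intro hh; exact hne (by rw [hh])
        simpa using add_lt_add_left (ih ys (by simpa using hl) htl this) x
      · have : x < y := lt_of_le_of_ne h0 hxy
        have h2 := sum_le_getD xs ys (by simpa using hl) htl
        simp only [List.sum_cons]
        omega

theorem sumAll_le_of : ∀ (t s : List (List Int)), t.length = s.length →
    (∀ y, (t.getD y []).length = (s.getD y []).length) →
    (∀ y x, getc t y x ≤ getc s y x) → sumAll t ≤ sumAll s := by
  intro t
  induction t with
  | nil => intro s hl _ _; rw [(List.length_eq_zero_iff).mp hl.symm]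
  | cons r ts ih =>
    intro s hl hrl hle
    cases s with
    | nil => simp at hl
    | cons q ss =>
      simp only [sumAll, List.map_cons, List.sum_cons]
      refine add_le_add ?_ ?_
      · refine sum_le_getD r q (by simpa using hrl 0) ?_
        intro i; simpa [getc] using hle 0 i
      · have := ih ss (by simpa using hl) (fun y => by simpa using hrl (y + 1))
          (fun y x => by simpa [getc] using hle (y + 1) x)
        simpa [sumAll] using this

theorem sumAll_lt_of : ∀ (t s : List (List Int)), t.length = s.length →
    (∀ y, (t.getD y []).length = (s.getD y []).length) →
    (∀ y x, getc t y x ≤ getc s y x) → t ≠ s → sumAll t < sumAll s := by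
  intro t
  induction t with
  | nil => intro s hl _ _ hne; exact absurd ((List.length_eq_zero_iff).mp hl.symm).symm hne
  | cons r ts ih =>
    intro s hl hrl hle hne
    cases s with
    | nil => simp at hl
    | cons q ss =>
      have hrq : ∀ i, r.getD i 0 ≤ q.getD i 0 := fun i => by simpa [getc] using hle 0 i
      have hlr : r.length = q.length := by simpa using hrl 0
      by_cases hh : r = q
      · subst hh
        have hts : ts ≠ ss := by intro hh2; exact hne (by rw [hh2])
        have := ih ss (by simpa using hl) (fun y => by simpa using hrl (y + 1))
          (fun y x => by simpa [getc] using hle (y + 1) x) hts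
        simp only [sumAll, List.map_cons, List.sum_cons] at this ⊢
        omega
      · have h1 := sum_lt_getD r q hlr hrq hh
        have h2 := sumAll_le_of ts ss (by simpa using hl) (fun y => by simpa using hrl (y + 1))
          (fun y x => by simpa [getc] using hle (y + 1) x)
        simp only [sumAll, List.map_cons, List.sum_cons] at h2 ⊢
        omega

theorem pointwise_of_LeT {hN wN : Nat} {t s : List (List Int)}
    (ht : Shape2 hN wN t) (hs : Shape2 hN wN s) (hle : LeT hN wN t s) :
    ∀ y x, getc t y x ≤ getc s y x := by
  intro y x
  by_cases hy : y < hN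
  · by_cases hx : x < wN
    · exact hle y x hy hx
    · unfold getc
      rw [getD_oob (by rw [row_len ht hy]; omega) 0, getD_oob (by rw [row_len hs hy]; omega) 0]
  · unfold getc
    rw [getD_oob (by rw [ht.1]; omega) [], getD_oob (by rw [hs.1]; omega) []]

theorem rowlen_all {hN wN : Nat} {t s : List (List Int)}
    (ht : Shape2 hN wN t) (hs : Shape2 hN wN s) :
    ∀ y, (t.getD y []).length = (s.getD y []).length := by
  intro y
  by_cases hy : y < hN
  · rw [row_len ht hy, row_len hs hy]
  · rw [getD_oob (by rw [ht.1]; omega) [], getD_oob (by rw [hs.1]; omega) []]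

theorem loopB_spec {f : List (List Int)} {hN wN : Nat} (hf : NNF f hN wN)
    {b : List (List Int)} (hb : PFT f hN wN b) :
    ∀ (n : Nat) (s : List (List Int)), Shape2 hN wN s → NNT hN wN s → LeT hN wN b s →
      (sumAll s).toNat < n →
      PFT f hN wN (loopB f (hN : Int) (wN : Int) n s) ∧
      Shape2 hN wN (loopB f (hN : Int) (wN : Int) n s) ∧
      LeT hN wN b (loopB f (hN : Int) (wN : Int) n s) ∧
      LeT hN wN (loopB f (hN : Int) (wN : Int) n s) s := by
  intro n
  induction n with
  | zero => intro s _ _ _ hlt; omega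
  | succ n ih =>
    intro s hsh hnn hble hlt
    by_cases hfix : jstep f (hN : Int) (wN : Int) s = s
    · have hres : loopB f (hN : Int) (wN : Int) (n + 1) s = s := by
        simp only [loopB, if_pos hfix]
      rw [hres]
      exact ⟨jstep_fix_PF hfix hsh, hsh, hble, fun y x hy hx => le_refl _⟩
    · have hres : loopB f (hN : Int) (wN : Int) (n + 1) s
          = loopB f (hN : Int) (wN : Int) n (jstep f (hN : Int) (wN : Int) s) := by
        simp only [loopB, if_neg hfix]
      set t := jstep f (hN : Int) (wN : Int) s with ht
      have hsht : Shape2 hN wN t := shape_jstep f s hN wN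
      have hnnt : NNT hN wN t := by
        intro y x hy hx
        rw [ht, getc_jstep f s hy hx]
        exact jval_nonneg hf hnn hy hx
      have hblet : LeT hN wN b t := by
        intro y x hy hx
        rw [ht, getc_jstep f s hy hx]
        exact jval_ge_b hb hble hy hx
      have hlets : LeT hN wN t s := by
        intro y x hy hx
        rw [ht, getc_jstep f s hy hx]
        exact jval_le_self f s hN wN y x
      have hsum : sumAll t < sumAll s := by
        refine sumAll_lt_of t s (by rw [hsht.1, hsh.1]) (rowlen_all hsht hsh)
          (pointwise_of_LeT hsht hsh hlets) hfix
      have hnn0 : 0 ≤ sumAll t := sumAll_nonneg hsht hnnt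
      obtain ⟨hpf, hsh', hble', hle'⟩ := ih t hsht hnnt hblet (by omega)
      rw [hres]
      exact ⟨hpf, hsh', hble', fun y x hy hx => le_trans (hle' y x hy hx) (hlets y x hy hx)⟩

-- ---------- the common seed table: A's row-major fill ----------
theorem foldl_append_const {α β : Type} (r : β) :
    ∀ (l : List α) (init : List β), l.foldl (fun s _ => s ++ [r]) init = init ++ List.replicate l.length r := by
  intro l
  induction l with
  | nil => intro init; simp
  | cons a t ih =>
    intro init
    rw [List.foldl_cons, ih, List.length_cons, List.replicate_succ]
    simp

theorem initA0_eq (f : List (List Int)) :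
    ((PySem.List.pyRange 0 (f.length : Int) 1).foldl
        (fun s _ => s ++ [List.replicate ((f.headD []).length : Int).toNat (0 : Int)]) [])
      = List.replicate f.length (List.replicate (f.headD []).length 0) := by
  rw [foldl_append_const]
  simp [PySem.List.length_pyRange_one]

theorem fillCell_eq (f s : List (List Int)) (yN xN : Nat) :
    fillCell f s (yN : Int) (xN : Int) = setc s yN xN
      (if yN = 0 ∧ xN = 0 then getc f 0 0
       else if yN = 0 then getc f yN xN + getc s yN (xN - 1)
       else if xN = 0 then getc f yN xN + getc s (yN - 1) xN
       else getc f yN xN + min (getc s (yN - 1) xN) (getc s yN (xN - 1))) := by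
  unfold fillCell set2 get2
  by_cases hy0 : yN = 0 <;> by_cases hx0 : xN = 0
  · subst hy0; subst hx0; simp
  · subst hy0
    have ex : ((xN : Int) - 1).toNat = xN - 1 := by omega
    simp [hx0, ex, Int.natCast_eq_zero]
  · subst hx0
    have ey : ((yN : Int) - 1).toNat = yN - 1 := by omega
    simp [hy0, ey, Int.natCast_eq_zero]
  · have ex : ((xN : Int) - 1).toNat = xN - 1 := by omega
    have ey : ((yN : Int) - 1).toNat = yN - 1 := by omega
    simp [hy0, hx0, ex, ey, Int.natCast_eq_zero]

def FillOK (f : List (List Int)) (hN wN yN xN : Nat) (s : List (List Int)) : Prop :=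
  Shape2 hN wN s ∧
  ∀ y' x' : Nat, x' < wN → (y' < yN ∨ (y' = yN ∧ x' < xN)) → getc s y' x' = dpR f y' x'

theorem fillCell_ok {f : List (List Int)} {hN wN yN xN : Nat} {s : List (List Int)}
    (hy : yN < hN) (hx : xN < wN) (h : FillOK f hN wN yN xN s) :
    FillOK f hN wN yN (xN + 1) (fillCell f s (yN : Int) (xN : Int)) := by
  obtain ⟨hsh, hprev⟩ := h
  rw [fillCell_eq]
  have hval : (if yN = 0 ∧ xN = 0 then getc f 0 0
       else if yN = 0 then getc f yN xN + getc s yN (xN - 1)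
       else if xN = 0 then getc f yN xN + getc s (yN - 1) xN
       else getc f yN xN + min (getc s (yN - 1) xN) (getc s yN (xN - 1))) = dpR f yN xN := by
    by_cases hy0 : yN = 0 <;> by_cases hx0 : xN = 0
    · subst hy0; subst hx0
      rw [if_pos ⟨rfl, rfl⟩, dpR]
    · obtain ⟨x0, rfl⟩ : ∃ x0, xN = x0 + 1 := ⟨xN - 1, by omega⟩
      subst hy0
      rw [if_neg (by omega), if_pos rfl]
      have : getc s 0 (x0 + 1 - 1) = dpR f 0 x0 := by
        have := hprev 0 x0 (by omega) (by omega)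
        simpa using this
      rw [this, dpR]
    · obtain ⟨y0, rfl⟩ : ∃ y0, yN = y0 + 1 := ⟨yN - 1, by omega⟩
      subst hx0
      rw [if_neg (by omega), if_neg (by omega), if_pos rfl]
      have : getc s (y0 + 1 - 1) 0 = dpR f y0 0 := by
        have := hprev y0 0 hx (by omega)
        simpa using this
      rw [this, dpR]
    · obtain ⟨x0, rfl⟩ : ∃ x0, xN = x0 + 1 := ⟨xN - 1, by omega⟩
      obtain ⟨y0, rfl⟩ : ∃ y0, yN = y0 + 1 := ⟨yN - 1, by omega⟩
      rw [if_neg (by omega), if_neg (by omega), if_neg (by omega)]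
      have h1 : getc s (y0 + 1 - 1) (x0 + 1) = dpR f y0 (x0 + 1) := by
        have := hprev y0 (x0 + 1) hx (by omega)
        simpa using this
      have h2 : getc s (y0 + 1) (x0 + 1 - 1) = dpR f (y0 + 1) x0 := by
        have := hprev (y0 + 1) x0 (by omega) (by omega)
        simpa using this
      rw [h1, h2, dpR]
  rw [hval]
  refine ⟨shape_setc hsh yN xN _, ?_⟩
  intro y' x' hx' hcond
  rw [getc_setc]
  by_cases hc : yN = y' ∧ xN = x'
  · rw [if_pos ⟨hc.1, hc.2, by rw [hsh.1]; exact hy, by rw [row_len hsh hy]; exact hx⟩, hc.1, hc.2]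
  · rw [if_neg (by tauto)]
    exact hprev y' x' hx' (by omega)

theorem fillRow_ok {f : List (List Int)} {hN wN yN : Nat} {s : List (List Int)}
    (hy : yN < hN) (h : FillOK f hN wN yN 0 s) :
    FillOK f hN wN (yN + 1) 0
      ((PySem.List.pyRange 0 (wN : Int) 1).foldl (fun s x => fillCell f s (yN : Int) x) s) := by
  rw [PySem.List.pyRange_zero_natCast, List.foldl_map]
  have aux : ∀ k, k ≤ wN → FillOK f hN wN yN k
      ((List.range k).foldl (fun s (x : Nat) => fillCell f s (yN : Int) (x : Int)) s) := by
    intro k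
    induction k with
    | zero => intro _; exact h
    | succ j ih =>
      intro hk
      rw [List.range_succ, List.foldl_append, List.foldl_cons, List.foldl_nil]
      exact fillCell_ok hy (by omega) (ih (by omega))
  obtain ⟨hsh, hpt⟩ := aux wN (le_refl wN)
  refine ⟨hsh, ?_⟩
  intro y' x' hx' hcond
  exact hpt y' x' hx' (by omega)

theorem initA_fill_eq (f : List (List Int)) :
    ((PySem.List.pyRange 0 (f.length : Int) 1).foldl
        (fun s y => (PySem.List.pyRange 0 (((f.headD []).length : Nat) : Int) 1).foldl
          (fun s x => fillCell f s y x) s)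
        (List.replicate f.length (List.replicate (f.headD []).length 0)))
      = dpTable f f.length (f.headD []).length := by
  set hN := f.length with hh
  set wN := (f.headD []).length with hw
  rw [PySem.List.pyRange_zero_natCast hN, List.foldl_map]
  have aux : ∀ k, k ≤ hN → FillOK f hN wN k 0
      ((List.range k).foldl
        (fun s (y : Nat) => (PySem.List.pyRange 0 (wN : Int) 1).foldl (fun s x => fillCell f s (y : Int) x) s)
        (List.replicate hN (List.replicate wN 0))) := by
    intro k
    induction k with
    | zero =>
      intro _
      exact ⟨shape_replicate hN wN, fun y' x' _ hcond => by omega⟩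
    | succ j ih =>
      intro hk
      rw [List.range_succ, List.foldl_append, List.foldl_cons, List.foldl_nil]
      exact fillRow_ok (by omega) (ih (by omega))
  obtain ⟨hsh, hpt⟩ := aux hN (le_refl hN)
  refine table_ext hsh (shape_dpTable f hN wN) ?_
  intro y x hy hx
  rw [hpt y x hx (Or.inl hy), getc_dpTable hy hx]

-- ---------- the common seed table: B's scans ----------
theorem scanB_eq (f : List (List Int)) (wN : Nat) :
    ((PySem.List.pyRange 0 (wN : Int) 1).foldl
        (fun (p : Int × List Int) x => (p.1 + get2 f 0 x, p.2 ++ [p.1 + get2 f 0 x])) (0, []))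
      = ((if wN = 0 then 0 else dpR f 0 (wN - 1)), (List.range wN).map (fun x => dpR f 0 x)) := by
  rw [PySem.List.pyRange_zero_natCast, List.foldl_map]
  induction wN with
  | zero => simp
  | succ j ih =>
    have hval : (if j = 0 then 0 else dpR f 0 (j - 1)) + get2 f 0 (j : Int) = dpR f 0 j := by
      have hg : get2 f 0 (j : Int) = getc f 0 j := by simp [get2]
      cases j with
      | zero => rw [if_pos rfl, hg, dpR]; omega
      | succ i =>
        rw [if_neg (by omega), hg]
        simp only [Nat.add_sub_cancel]
        rw [dpR]
        omega
    rw [List.range_succ, List.foldl_append, List.foldl_cons, List.foldl_nil, ih]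
    dsimp only
    rw [List.map_append, if_neg (Nat.succ_ne_zero j)]
    simp only [Nat.add_sub_cancel, List.map_cons, List.map_nil]
    rw [Prod.mk.injEq]
    exact ⟨hval, by rw [hval]⟩

theorem rowB_eq (f : List (List Int)) (wN yN : Nat) (hw : 1 ≤ wN) :
    rowB f ((List.range wN).map (fun x => dpR f yN x)) ((yN : Int) + 1) (wN : Int)
      = (List.range wN).map (fun x => dpR f (yN + 1) x) := by
  unfold rowB
  rw [PySem.List.pyRange_one, List.foldl_map]
  have hbase : (((List.range wN).map (fun x => dpR f yN x)).getD 0 0 + get2 f ((yN : Int) + 1) 0)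
      = dpR f (yN + 1) 0 := by
    rw [mapRange_getD _ (by omega)]
    have e : ((yN : Int) + 1).toNat = yN + 1 := by omega
    have hg : get2 f ((yN : Int) + 1) 0 = getc f (yN + 1) 0 := by simp [get2, e]
    rw [hg, dpR]
    omega
  have aux : ∀ j, j ≤ wN - 1 →
      ((List.range j).foldl
        (fun (row : List Int) (k : Nat) =>
          row ++ [get2 f ((yN : Int) + 1) (1 + (k : Int)) +
            min (((List.range wN).map (fun x => dpR f yN x)).getD (1 + (k : Int)).toNat 0) (row.getLastD 0)])
        [((List.range wN).map (fun x => dpR f yN x)).getD 0 0 + get2 f ((yN : Int) + 1) 0])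
      = (List.range (j + 1)).map (fun x => dpR f (yN + 1) x) := by
    intro j
    induction j with
    | zero =>
      intro _
      simp only [List.range_zero, List.foldl_nil, hbase]
      simp [List.range_succ]
    | succ i ih =>
      intro hj
      rw [List.range_succ, List.foldl_append, List.foldl_cons, List.foldl_nil, ih (by omega)]
      have e1 : ((1 : Int) + (i : Int)).toNat = i + 1 := by omega
      have hg : get2 f ((yN : Int) + 1) (1 + (i : Int)) = getc f (yN + 1) (i + 1) := by
        have e2 : ((yN : Int) + 1).toNat = yN + 1 := by omega
        simp [get2, e1, e2]
      have hprev : ((List.range wN).map (fun x => dpR f yN x)).getD (i + 1) 0 = dpR f yN (i + 1) :=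
        mapRange_getD _ (by omega) 0
      have hlast : ((List.range (i + 1)).map (fun x => dpR f (yN + 1) x)).getLastD 0 = dpR f (yN + 1) i := by
        rw [List.range_succ, List.map_append]
        exact List.getLastD_concat
      rw [e1, hg, hprev, hlast]
      have hval : getc f (yN + 1) (i + 1) + min (dpR f yN (i + 1)) (dpR f (yN + 1) i)
          = dpR f (yN + 1) (i + 1) := by rw [dpR]
      rw [hval, show List.range (i + 1 + 1) = List.range (i + 1) ++ [i + 1] from List.range_succ,
        List.map_append]
      simp
  have hlen : (((wN : Int)) - 1).toNat = wN - 1 := by omega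
  rw [hlen]
  have := aux (wN - 1) (le_refl _)
  rw [this, show wN - 1 + 1 = wN from by omega]

theorem initB_eq (f : List (List Int)) (hN wN : Nat) (hh : 1 ≤ hN) (hw : 1 ≤ wN) :
    ((PySem.List.pyRange 1 (hN : Int) 1).foldl
        (fun s y => s ++ [rowB f (s.getLastD []) y (wN : Int)])
        [(List.range wN).map (fun x => dpR f 0 x)])
      = dpTable f hN wN := by
  rw [PySem.List.pyRange_one, List.foldl_map]
  have aux : ∀ m, m ≤ hN - 1 →
      ((List.range m).foldl
        (fun s (k : Nat) => s ++ [rowB f (s.getLastD []) (1 + (k : Int)) (wN : Int)])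
        [(List.range wN).map (fun x => dpR f 0 x)])
      = (List.range (m + 1)).map (fun y => (List.range wN).map (fun x => dpR f y x)) := by
    intro m
    induction m with
    | zero => intro _; simp [List.range_succ]
    | succ i ih =>
      intro hm
      rw [List.range_succ, List.foldl_append, List.foldl_cons, List.foldl_nil, ih (by omega)]
      have hlast : ((List.range (i + 1)).map (fun y => (List.range wN).map (fun x => dpR f y x))).getLastD []
          = (List.range wN).map (fun x => dpR f i x) := by
        rw [List.range_succ, List.map_append]
        exact List.getLastD_concat
      have hcast : (1 : Int) + (i : Int) = ((i : Int) + 1) := by omega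
      rw [hlast, hcast, rowB_eq f wN i hw,
        show List.range (i + 1 + 1) = List.range (i + 1) ++ [i + 1] from List.range_succ,
        List.map_append]
      simp
  have hlen : (((hN : Int)) - 1).toNat = hN - 1 := by omega
  rw [hlen]
  have := aux (hN - 1) (le_refl _)
  rw [this, show hN - 1 + 1 = hN from by omega]
  rfl

-- ---------- degenerate shapes: one row or one column ----------
theorem sweepL_nil {hN wN : Nat} (h : hN = 1 ∨ wN = 1) :
    sweepL (hN : Int) (wN : Int) = [] := by
  unfold sweepL
  have h1 : PySem.List.pyRange (((1 : Nat) : Int) - 2) (-1) (-1) = [] :=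
    PySem.List.pyRange_neg_one_eq_nil (by omega)
  have h2 : PySem.List.pyRange 1 ((1 : Nat) : Int) 1 = [] :=
    PySem.List.pyRange_one_eq_nil (by omega)
  rcases h with h | h <;> subst h <;> rw [h1, h2] <;> simp

theorem ud_thin {f : List (List Int)} (h : f.length = 1 ∨ (f.headD []).length = 1)
    (s : List (List Int)) : update_diags f s = (0, s) := by
  rw [ud_flat, sweepL_nil h]
  rfl

theorem jstep_thin {f : List (List Int)} {hN wN : Nat} (h : hN = 1 ∨ wN = 1)
    {T : List (List Int)} (hsh : Shape2 hN wN T) : jstep f (hN : Int) (wN : Int) T = T := by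
  refine table_ext (shape_jstep f T hN wN) hsh ?_
  intro y x hy hx
  rw [getc_jstep f T hy hx]
  have hc1 : ¬(0 < (y : Int) ∧ 0 < (x : Int)) := by omega
  have hc2 : ¬((y : Int) < (hN : Int) - 1 ∧ (x : Int) < (wN : Int) - 1) := by omega
  simp only [jval]
  rw [if_neg hc2, if_neg hc1]
  simp [get2]

-- ---------- a trivial post-fixpoint to seed the main argument ----------
theorem PFT_zero {f : List (List Int)} {hN wN : Nat} (hf : NNF f hN wN) :
    PFT f hN wN (List.replicate hN (List.replicate wN 0)) := by
  constructor
  · intro y x hy hx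
    simp only [getc_replicate]
    have := hf y x (by omega) (by omega)
    simp
    omega
  · intro y x _ hy _ hx
    simp only [getc_replicate]
    have := hf y x hy hx
    simp
    omega

-- ===== VERDICT helper: the whole equivalence =====
theorem main_equiv (f : List (List Int)) (hpre : Pre_make_sumtable f) :
    make_sumtable f = make_sumtable_alt f := by
  obtain ⟨hfne, hrne, hlen, hcase⟩ := hpre
  have hh : 1 ≤ f.length := List.length_pos_iff.mpr hfne
  have hw : 1 ≤ (f.headD []).length := List.length_pos_iff.mpr hrne
  have hA : make_sumtable f
      = loopA f ((sumAll (dpTable f f.length (f.headD []).length)).toNat + 1)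
          (dpTable f f.length (f.headD []).length) := by
    simp only [make_sumtable]
    rw [initA0_eq f, initA_fill_eq f]
  have hB : make_sumtable_alt f
      = loopB f (f.length : Int) ((f.headD []).length : Int)
          ((sumAll (dpTable f f.length (f.headD []).length)).toNat + 1)
          (dpTable f f.length (f.headD []).length) := by
    simp only [make_sumtable_alt]
    rw [scanB_eq f]
    dsimp only
    rw [initB_eq f f.length (f.headD []).length hh hw]
  set T := dpTable f f.length (f.headD []).length with hT
  have hshT : Shape2 f.length (f.headD []).length T := shape_dpTable f _ _
  rw [hA, hB]
  by_cases hthin : f.length = 1 ∨ (f.headD []).length = 1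
  · have hA2 : loopA f ((sumAll T).toNat + 1) T = T := by
      simp only [loopA]
      rw [ud_thin hthin T]
      simp
    have hB2 : loopB f (f.length : Int) ((f.headD []).length : Int) ((sumAll T).toNat + 1) T = T := by
      simp only [loopB]
      rw [jstep_thin hthin hshT]
      simp
    rw [hA2, hB2]
  · have hnnf : NNF f f.length (f.headD []).length := by
      rcases hcase with h | h | h
      · exact absurd (Or.inl h) hthin
      · exact absurd (Or.inr h) hthin
      · intro y x hy hx
        have hrow : (f.headD []).length ≤ (f[y]'hy).length := hlen _ (List.getElem_mem hy)
        have hxl : x < (f[y]'hy).length := by omega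
        have h1 : x < ((f[y]'hy).take (f.headD []).length).length := by
          rw [List.length_take]; omega
        have h3 := h _ (List.getElem_mem hy) _ (List.getElem_mem h1)
        rw [List.getElem_take] at h3
        rw [getc_eq_getElem hy hxl]
        exact h3
    have hnnT : NNT f.length (f.headD []).length T := by
      intro y x hy hx
      rw [hT, getc_dpTable hy hx]
      exact dpR_nonneg hnnf y hy x hx
    have hleZT : LeT f.length (f.headD []).length
        (List.replicate f.length (List.replicate (f.headD []).length 0)) T := by
      intro y x hy hx
      rw [getc_replicate, hT, getc_dpTable hy hx]
      exact dpR_nonneg hnnf y hy x hx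
    obtain ⟨hpfB, hshB, _, hleBT⟩ :=
      loopB_spec hnnf (PFT_zero hnnf) ((sumAll T).toNat + 1) T hshT hnnT hleZT (by omega)
    obtain ⟨hpfA, hshA, hgeBA, hleAT⟩ :=
      loopA_spec hnnf hpfB ((sumAll T).toNat + 1) T hshT hnnT hleBT (by omega)
    obtain ⟨_, _, hgeAB, _⟩ :=
      loopB_spec hnnf hpfA ((sumAll T).toNat + 1) T hshT hnnT hleAT (by omega)
    refine table_ext hshA hshB ?_
    intro y x hy hx
    exact le_antisymm (hgeAB y x hy hx) (hgeBA y x hy hx)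

-- ===== VERDICT (by name: the statement is the Claim_ definition above) =====
theorem make_sumtable_spec : Claim_equal_make_sumtable := by
  unfold Claim_equal_make_sumtable Spec_make_sumtable
  intro f _hdom hpre
  exact main_equiv f hpre
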